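-- pv_equiv track=rewrite | github.com/Shiouhe-Wang/source-surface-optimization-algorithm | SSR_optimal.py | compare_groups
-- ===== SOURCE A (Python) =====
-- def compare_groups(numbers):
--     positives = [x for x in numbers if x > 0]
--     negatives = [x for x in numbers if x < 0]
--     top_positives = sorted(positives, reverse=True)[:15]
--     top_negatives = sorted(negatives, key=lambda x: abs(x), reverse=True)[:15]
--     sum_pos = sum(top_positives)
--     sum_neg_abs = sum(abs(x) for x in top_negatives)
--     if sum_pos >= sum_neg_abs:
--         return top_positives, sum_pos
--     else:
--         return top_negatives,sum_neg_abs
-- ===== SOURCE B (Python) =====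
-- def compare_groups(numbers):
--     positives = []
--     negatives = []
--     for x in sorted(numbers, key=abs, reverse=True):
--         if x > 0 and len(positives) < 15:
--             positives.append(x)
--         elif x < 0 and len(negatives) < 15:
--             negatives.append(x)
--     sum_pos = sum(positives)
--     sum_neg_abs = -sum(negatives)
--     if sum_pos >= sum_neg_abs:
--         return positives, sum_pos
--     else:
--         return negatives, sum_neg_abs
-- ===== Notes on version B (the rewrite author's own statement) =====
-- stated objective: alternative
-- what changed: Replaces A's two independent filter+sort+slice passes with one combined stable sort of the whole list by absolute value descending followed by a single partitioning pass that caps each side at 15, and computes the negative sum as a plain negated sum instead of a sum of absolute values.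
import Mathlib
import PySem

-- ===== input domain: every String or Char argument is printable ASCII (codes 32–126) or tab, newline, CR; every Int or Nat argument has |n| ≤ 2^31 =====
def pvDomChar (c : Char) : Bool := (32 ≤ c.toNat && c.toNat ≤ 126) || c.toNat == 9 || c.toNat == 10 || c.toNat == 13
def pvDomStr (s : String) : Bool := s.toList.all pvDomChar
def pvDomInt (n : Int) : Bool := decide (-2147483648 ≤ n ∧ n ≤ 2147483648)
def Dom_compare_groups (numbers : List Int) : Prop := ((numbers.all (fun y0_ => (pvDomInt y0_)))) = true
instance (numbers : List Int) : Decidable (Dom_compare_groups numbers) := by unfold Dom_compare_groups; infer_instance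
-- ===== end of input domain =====

-- B replaces A's two independent filter+sort+slice passes by one combined stable sort by |x|
-- descending plus a single capped partitioning pass (objective: alternative, same asymptotic cost).

-- ===== PORT A =====
def compare_groups (numbers : List Int) : List Int × Int :=
  let positives := numbers.filter (fun x => decide (0 < x))
  let negatives := numbers.filter (fun x => decide (x < 0))
  let top_positives := PySem.List.slice (PySem.List.sorted positives (fun x => x) true) none (some 15)
  let top_negatives := PySem.List.slice (PySem.List.sorted negatives (fun x => |x|) true) none (some 15)
  let sum_pos := top_positives.sum
  let sum_neg_abs := (top_negatives.map (fun x => |x|)).sum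
  if sum_pos ≥ sum_neg_abs then (top_positives, sum_pos) else (top_negatives, sum_neg_abs)

-- ===== PORT B =====
def compare_groups_alt (numbers : List Int) : List Int × Int :=
  let pn := (PySem.List.sorted numbers (fun x => |x|) true).foldl
    (fun (pn : List Int × List Int) x =>
      if 0 < x ∧ pn.1.length < 15 then (pn.1 ++ [x], pn.2)
      else if x < 0 ∧ pn.2.length < 15 then (pn.1, pn.2 ++ [x])
      else pn) ([], [])
  let sum_pos := pn.1.sum
  let sum_neg_abs := -pn.2.sum
  if sum_pos ≥ sum_neg_abs then (pn.1, sum_pos) else (pn.2, sum_neg_abs)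

-- ===== PRECONDITION & SPEC =====
def Spec_compare_groups (numbers : List Int) (out : List Int × Int) : Prop := out = compare_groups_alt numbers
instance (numbers : List Int) (out : List Int × Int) : Decidable (Spec_compare_groups numbers out) := by unfold Spec_compare_groups; infer_instance

-- ===== CLAIM (what is proved, stated in full; the proofs are below) =====
def Claim_equal_compare_groups : Prop := ∀ (numbers : List Int), Dom_compare_groups numbers → Spec_compare_groups numbers (compare_groups numbers)

-- ===== LEMMAS AND PROOFS =====

-- insertBy puts x in front when x goes before every element
theorem insertBy_all_before {α : Type} (b : α → α → Bool) (x : α) (ys : List α)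
    (h : ∀ y ∈ ys, b x y = true) : PySem.List.insertBy b x ys = x :: ys := by
  cases ys with
  | nil => rfl
  | cons y ys => simp [PySem.List.insertBy, h y (by simp)]

-- insertBy only looks at `b x ·` on the list elements
theorem insertBy_congr {α : Type} (b1 b2 : α → α → Bool) (x : α) (ys : List α)
    (h : ∀ y ∈ ys, b1 x y = b2 x y) : PySem.List.insertBy b1 x ys = PySem.List.insertBy b2 x ys := by
  induction ys with
  | nil => rfl
  | cons y ys ih =>
      simp only [PySem.List.insertBy]
      rw [h y (by simp)]
      by_cases hb : b2 x y = true
      · simp [hb]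
      · simp [hb, ih (fun z hz => h z (by simp [hz]))]

-- filtering commutes with a single reverse-key insertion into a key-nonincreasing list
theorem filter_insertBy {α κ : Type} [LinearOrder κ] (key : α → κ) (p : α → Bool) (x : α)
    (ys : List α) (h : ys.Pairwise (fun a b => key b ≤ key a)) :
    (PySem.List.insertBy (fun a b => decide (key b < key a)) x ys).filter p =
      if p x then PySem.List.insertBy (fun a b => decide (key b < key a)) x (ys.filter p)
      else ys.filter p := by
  induction ys with
  | nil =>
      by_cases hp : p x = true <;> simp [PySem.List.insertBy, hp]
  | cons y ys ih =>
      have hy : ∀ z ∈ ys, key z ≤ key y := (List.pairwise_cons.1 h).1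
      have hps : ys.Pairwise (fun a b => key b ≤ key a) := (List.pairwise_cons.1 h).2
      have hrec := ih hps
      by_cases hlt : key y < key x
      · by_cases hpx : p x = true
        · by_cases hpy : p y = true
          · simp [PySem.List.insertBy, hlt, hpx, hpy]
          · have hall : PySem.List.insertBy (fun a b => decide (key b < key a)) x (ys.filter p)
                = x :: ys.filter p := by
              apply insertBy_all_before
              intro z hz
              have hz' : z ∈ ys := List.mem_of_mem_filter hz
              simp only [decide_eq_true_eq]
              exact lt_of_le_of_lt (hy z hz') hlt
            simp [PySem.List.insertBy, hlt, hpx, hpy, hall]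
        · simp [PySem.List.insertBy, hlt, hpx]
      · by_cases hpy : p y = true <;> by_cases hpx : p x = true <;>
          simp [PySem.List.insertBy, hlt, hpy, hpx, hrec]

-- one append step of the stable reverse sort
theorem sorted_rev_append_singleton {α κ : Type} [LinearOrder κ] (key : α → κ) (xs : List α) (x : α) :
    PySem.List.sorted (xs ++ [x]) key true =
      PySem.List.insertBy (fun a b => decide (key b < key a)) x (PySem.List.sorted xs key true) := by
  simp [PySem.List.sorted, List.foldl_append]

-- filtering commutes with the stable reverse sort
theorem filter_sorted_rev {α κ : Type} [LinearOrder κ] (key : α → κ) (p : α → Bool) (xs : List α) :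
    (PySem.List.sorted xs key true).filter p = PySem.List.sorted (xs.filter p) key true := by
  induction xs using List.reverseRecOn with
  | nil => rfl
  | append_singleton xs x ih =>
      rw [sorted_rev_append_singleton, filter_insertBy key p x _ (PySem.List.sorted_pairwise_rev xs key),
        ih, List.filter_append]
      by_cases hp : p x = true
      · simp [hp, sorted_rev_append_singleton]
      · simp [hp]

-- the sort only looks at the key on list elements
theorem sorted_congr_key {α κ : Type} [LinearOrder κ] (key1 key2 : α → κ) (xs : List α)
    (h : ∀ x ∈ xs, key1 x = key2 x) :
    PySem.List.sorted xs key1 true = PySem.List.sorted xs key2 true := by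
  induction xs using List.reverseRecOn with
  | nil => rfl
  | append_singleton xs x ih =>
      rw [sorted_rev_append_singleton, sorted_rev_append_singleton,
        ih (fun z hz => h z (by simp [hz]))]
      apply insertBy_congr
      intro y hy
      have hyx : y ∈ xs := (PySem.List.mem_sorted _ _ _ _).1 hy
      rw [h y (by simp [hyx]), h x (by simp)]

-- the capped partitioning fold, characterised by filter + take
theorem fold_caps (l : List Int) (accP accN : List Int)
    (hP : accP.length ≤ 15) (hN : accN.length ≤ 15) :
    l.foldl (fun (pn : List Int × List Int) x =>
      if 0 < x ∧ pn.1.length < 15 then (pn.1 ++ [x], pn.2)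
      else if x < 0 ∧ pn.2.length < 15 then (pn.1, pn.2 ++ [x])
      else pn) (accP, accN) =
      (accP ++ (l.filter (fun x => decide (0 < x))).take (15 - accP.length),
       accN ++ (l.filter (fun x => decide (x < 0))).take (15 - accN.length)) := by
  induction l generalizing accP accN with
  | nil => simp
  | cons x l ih =>
      rcases lt_trichotomy x 0 with hx | hx | hx
      · have hnp : ¬ (0:Int) < x := by omega
        by_cases h2 : accN.length < 15
        · rw [List.foldl_cons, if_neg (by simp; omega), if_pos ⟨hx, h2⟩,
            ih _ _ hP (by simp; omega)]
          have hlen : 15 - accN.length = (15 - (accN.length + 1)) + 1 := by omega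
          simp only [List.filter_cons, decide_eq_true_eq, if_neg hnp, if_pos hx, hlen,
            List.take_succ_cons, List.append_assoc, List.length_append, List.length_cons,
            List.length_nil, List.singleton_append, List.cons_append, List.nil_append]
        · have h0 : 15 - accN.length = 0 := by omega
          rw [List.foldl_cons, if_neg (by simp; omega), if_neg (by simp; omega), ih _ _ hP hN]
          simp only [List.filter_cons, decide_eq_true_eq, if_neg hnp, if_pos hx, h0,
            List.take_zero, List.append_nil]
      · subst hx
        rw [List.foldl_cons, if_neg (by simp), if_neg (by simp), ih _ _ hP hN]
        simp [List.filter_cons]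
      · have hnn : ¬ x < (0:Int) := by omega
        by_cases h2 : accP.length < 15
        · rw [List.foldl_cons, if_pos ⟨hx, h2⟩, ih _ _ (by simp; omega) hN]
          have hlen : 15 - accP.length = (15 - (accP.length + 1)) + 1 := by omega
          simp only [List.filter_cons, decide_eq_true_eq, if_neg hnn, if_pos hx, hlen,
            List.take_succ_cons, List.append_assoc, List.length_append, List.length_cons,
            List.length_nil, List.singleton_append, List.cons_append, List.nil_append]
        · have h0 : 15 - accP.length = 0 := by omega
          rw [List.foldl_cons, if_neg (by simp; omega), if_neg (by simp; omega), ih _ _ hP hN]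
          simp only [List.filter_cons, decide_eq_true_eq, if_neg hnn, if_pos hx, h0,
            List.take_zero, List.append_nil]

theorem sum_map_abs_of_neg (l : List Int) (h : ∀ x ∈ l, x < 0) :
    (l.map (fun x => |x|)).sum = -l.sum := by
  induction l with
  | nil => simp
  | cons x l ih =>
      simp only [List.map_cons, List.sum_cons, ih (fun z hz => h z (by simp [hz]))]
      have hx := h x (by simp)
      have : |x| = -x := abs_of_neg hx
      omega

-- ===== VERDICT (by name: the statement is the Claim_ definition above) =====
theorem compare_groups_spec : Claim_equal_compare_groups := by
  intro numbers _
  unfold Spec_compare_groups compare_groups compare_groups_alt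
  simp only []
  rw [fold_caps _ [] [] (by simp) (by simp)]
  have hpos : (PySem.List.sorted numbers (fun x => |x|) true).filter (fun x => decide (0 < x))
      = PySem.List.sorted (numbers.filter (fun x => decide (0 < x))) (fun x => x) true := by
    rw [filter_sorted_rev]
    exact (sorted_congr_key _ _ _ (fun x hx => by
      have hx0 : (0:Int) < x := by simpa using (List.mem_filter.1 hx).2
      simp [abs_of_pos hx0])).symm
  have hneg : (PySem.List.sorted numbers (fun x => |x|) true).filter (fun x => decide (x < 0))
      = PySem.List.sorted (numbers.filter (fun x => decide (x < 0))) (fun x => |x|) true :=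
    filter_sorted_rev _ _ _
  have hslice : ∀ xs : List Int, PySem.List.slice xs none (some 15) = xs.take 15 := by
    intro xs; rw [PySem.List.slice_to _ (by norm_num)]; rfl
  have hsum : (((PySem.List.sorted (numbers.filter (fun x => decide (x < 0))) (fun x => |x|) true).take 15).map (fun x => |x|)).sum
      = -((PySem.List.sorted (numbers.filter (fun x => decide (x < 0))) (fun x => |x|) true).take 15).sum := by
    apply sum_map_abs_of_neg
    intro x hx
    have hx1 := List.mem_of_mem_take hx
    have hx2 := (PySem.List.mem_sorted _ _ _ _).1 hx1
    simpa using (List.mem_filter.1 hx2).2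
  rw [hpos, hneg, hslice, hslice, hsum]
  simp
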